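-- pv_equiv track=rewrite | github.com/MahmoudKebbi/programmable-matter-RL-2.0 | src/grid.py | is_connected_after_move
-- ===== SOURCE A (Python) =====
-- from collections import deque
--
-- def is_connected_after_move(new_positions: list) -> bool:
--     """
--     Simulates a move and checks if the new state remains connected.
--     """
--     matter_set = set(new_positions)
--     visited = set()
--     queue = deque([new_positions[0]])  # Start from any matter element
--     visited.add(new_positions[0])
--
--     directions = [
--         (-1, -1),
--         (-1, 0),
--         (-1, 1),
--         (0, -1),
--         (0, 1),
--         (1, -1),
--         (1, 0),
--         (1, 1),
--     ]
--
--     while queue: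
--         cx, cy = queue.popleft()
--         for dx, dy in directions:
--             neighbor = (cx + dx, cy + dy)
--             if neighbor in matter_set and neighbor not in visited:
--                 visited.add(neighbor)
--                 queue.append(neighbor)
--
--     return len(visited) == len(matter_set)
-- ===== SOURCE B (Python) =====
-- def is_connected_after_move(new_positions: list) -> bool:
--     """
--     Saturation (fixed-point) connectivity check: repeatedly absorb every matter
--     cell 8-adjacent to the reached set until it is saturated, no queue needed.
--     """
--     matter = set(new_positions)
--     reached = {new_positions[0]}
--     for _ in range(len(matter)):
--         frontier = {(x + dx, y + dy)
--                     for (x, y) in reached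
--                     for dx in (-1, 0, 1)
--                     for dy in (-1, 0, 1)}
--         reached = matter & frontier | reached
--     return len(reached) == len(matter)
-- ===== Notes on version B (the rewrite author's own statement) =====
-- stated objective: alternative
-- what changed: Replaced the queue-based BFS (deque + visited set, per-node neighbour expansion) by a whole-set saturation fixpoint: repeatedly intersect the 8-neighbourhood of the reached set with the matter set until saturated, then compare sizes; no queue or per-node bookkeeping, at the cost of recomputing the frontier each round.
import Mathlib
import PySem

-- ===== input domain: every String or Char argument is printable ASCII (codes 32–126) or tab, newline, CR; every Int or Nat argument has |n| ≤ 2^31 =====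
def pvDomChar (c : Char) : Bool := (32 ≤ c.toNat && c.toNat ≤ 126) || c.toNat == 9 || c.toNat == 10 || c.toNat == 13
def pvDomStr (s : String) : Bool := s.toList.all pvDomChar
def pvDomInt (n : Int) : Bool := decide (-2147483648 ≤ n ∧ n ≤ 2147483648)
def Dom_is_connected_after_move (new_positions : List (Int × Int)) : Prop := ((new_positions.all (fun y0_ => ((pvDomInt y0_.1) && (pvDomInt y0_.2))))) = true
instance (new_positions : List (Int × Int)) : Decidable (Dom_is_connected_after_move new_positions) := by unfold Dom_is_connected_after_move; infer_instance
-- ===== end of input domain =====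

-- B replaces A's queue-based BFS by a whole-set saturation fixpoint (alternative
-- decomposition, same result); both index new_positions[0], so Pre_ excludes [].

-- ===== PORT A =====
def pvDirs : List (Int × Int) :=
  [(-1, -1), (-1, 0), (-1, 1), (0, -1), (0, 1), (1, -1), (1, 0), (1, 1)]

-- one step of A's inner 'for dx, dy in directions' loop over the state (queue, visited)
def pvBfsScan (matter : List (Int × Int)) (c : Int × Int)
    (qv : List (Int × Int) × List (Int × Int)) (d : Int × Int) :
    List (Int × Int) × List (Int × Int) :=
  let nb := (c.1 + d.1, c.2 + d.2)
  if nb ∈ matter ∧ nb ∉ qv.2 then (qv.1 ++ [nb], qv.2 ++ [nb]) else qv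

-- A's 'while queue' loop; the fuel bounds the number of pops (new_positions.length
-- pops always suffice — proved in pv_bfs_main below, which shows the fuel-0 case is unreachable)
def pvBfs (matter : List (Int × Int)) :
    Nat → List (Int × Int) → List (Int × Int) → List (Int × Int)
  | 0, _, visited => visited
  | _ + 1, [], visited => visited
  | fuel + 1, c :: rest, visited =>
    let qv := pvDirs.foldl (pvBfsScan matter c) (rest, visited)
    pvBfs matter fuel qv.1 qv.2

def is_connected_after_move (new_positions : List (Int × Int)) : Bool :=
  match new_positions with
  | [] => false   -- Python raises IndexError here (new_positions[0]); excluded by Pre_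
  | p :: _ =>
    let matter : PySem.Set (Int × Int) := PySem.Set.ofList new_positions
    let visited := pvBfs matter new_positions.length [p] [p]
    visited.length == matter.length

-- ===== PORT B =====
-- the 9-cell neighbourhood comprehension of one reached cell
def pvNbrs9 (p : Int × Int) : List (Int × Int) :=
  ([-1, 0, 1] : List Int).flatMap (fun dx =>
    ([-1, 0, 1] : List Int).map (fun dy => (p.1 + dx, p.2 + dy)))

-- one round of B's loop: reached = matter & frontier | reached
def pvGrow (matter reached : List (Int × Int)) : List (Int × Int) :=
  let frontier : PySem.Set (Int × Int) := PySem.Set.ofList (reached.flatMap pvNbrs9)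
  PySem.Set.union (PySem.Set.inter matter frontier) reached

def is_connected_after_move_alt (new_positions : List (Int × Int)) : Bool :=
  match new_positions with
  | [] => false   -- Python raises IndexError here (new_positions[0]); excluded by Pre_
  | p :: _ =>
    let matter : PySem.Set (Int × Int) := PySem.Set.ofList new_positions
    let reached := (List.range matter.length).foldl (fun r _ => pvGrow matter r) [p]
    reached.length == matter.length

-- ===== PRECONDITION & SPEC =====
-- Pre_ excludes only the empty list, on which A (and B) raise IndexError at new_positions[0].
def Pre_is_connected_after_move (new_positions : List (Int × Int)) : Prop :=
  new_positions ≠ []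
instance (new_positions : List (Int × Int)) : Decidable (Pre_is_connected_after_move new_positions) := by
  unfold Pre_is_connected_after_move; infer_instance

def pvWitness_is_connected_after_move : (List (Int × Int)) := [(0, 0), (1, 1)]

def Spec_is_connected_after_move (new_positions : List (Int × Int)) (out : Bool) : Prop :=
  out = is_connected_after_move_alt new_positions
instance (new_positions : List (Int × Int)) (out : Bool) : Decidable (Spec_is_connected_after_move new_positions out) := by
  unfold Spec_is_connected_after_move; infer_instance

-- ===== CLAIM (what is proved, stated in full; the proofs are below) =====
def Claim_equal_is_connected_after_move : Prop := ∀ (new_positions : List (Int × Int)), Dom_is_connected_after_move new_positions → Pre_is_connected_after_move new_positions → Spec_is_connected_after_move new_positions (is_connected_after_move new_positions)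

-- ===== LEMMAS AND PROOFS =====

-- 8-adjacency, exactly as A generates neighbours
def pvAdj (p q : Int × Int) : Prop :=
  q ∈ pvDirs.map (fun d => (p.1 + d.1, p.2 + d.2))

-- reachability from s through matter along 8-adjacency: the common spec of both loops
inductive pvReach (matter : List (Int × Int)) (s : Int × Int) : (Int × Int) → Prop
  | refl : pvReach matter s s
  | step (p q : Int × Int) : pvReach matter s p → q ∈ matter → pvAdj p q → pvReach matter s q

lemma pv_mem_nbrs9 (p x : Int × Int) : x ∈ pvNbrs9 p ↔ x = p ∨ pvAdj p x := by
  simp [pvNbrs9, pvAdj, pvDirs, Prod.ext_iff]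
  tauto

lemma pv_closed_complete (matter : List (Int × Int)) (s : Int × Int)
    (v : List (Int × Int)) (hs : s ∈ v)
    (hcl : ∀ p ∈ v, ∀ q ∈ matter, pvAdj p q → q ∈ v) :
    ∀ x, pvReach matter s x → x ∈ v := by
  intro x hx
  induction hx with
  | refl => exact hs
  | step p q _ hm ha ih => exact hcl p ih q hm ha

lemma pv_scan_fold (matter : List (Int × Int)) (c : Int × Int) :
    ∀ (dirs : List (Int × Int)) (q0 v0 : List (Int × Int)), v0.Nodup →
    ∃ l, dirs.foldl (pvBfsScan matter c) (q0, v0) = (q0 ++ l, v0 ++ l) ∧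
      (∀ x ∈ l, x ∈ matter ∧ x ∉ v0 ∧ ∃ d ∈ dirs, x = (c.1 + d.1, c.2 + d.2)) ∧
      (v0 ++ l).Nodup ∧
      (∀ d ∈ dirs, (c.1 + d.1, c.2 + d.2) ∈ matter → (c.1 + d.1, c.2 + d.2) ∈ v0 ++ l) := by
  intro dirs
  induction dirs with
  | nil => intro q0 v0 h; exact ⟨[], by simp, by simp, by simpa, by simp⟩
  | cons d dirs ih =>
    intro q0 v0 hv
    by_cases hc : (c.1 + d.1, c.2 + d.2) ∈ matter ∧ (c.1 + d.1, c.2 + d.2) ∉ v0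
    · have hv' : (v0 ++ [(c.1 + d.1, c.2 + d.2)]).Nodup := by
        simp [List.nodup_append, hv]
        intro a b hmem ha hb
        exact hc.2 (ha ▸ hb ▸ hmem)
      obtain ⟨l, heq, hprops, hnd, hcl⟩ := ih (q0 ++ [(c.1 + d.1, c.2 + d.2)]) (v0 ++ [(c.1 + d.1, c.2 + d.2)]) hv'
      refine ⟨(c.1 + d.1, c.2 + d.2) :: l, ?_, ?_, ?_, ?_⟩
      · simpa [pvBfsScan, hc] using heq
      · intro x hx
        rcases List.mem_cons.mp hx with hx | hx
        · subst hx; exact ⟨hc.1, hc.2, d, by simp, rfl⟩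
        · obtain ⟨h1, h2, dd, hdd, he⟩ := hprops x hx
          exact ⟨h1, fun h => h2 (by simp [h]), dd, by simp [hdd], he⟩
      · simpa using hnd
      · intro d' hd' hm
        rcases List.mem_cons.mp hd' with hd' | hd'
        · subst hd'; simp
        · have := hcl d' hd' hm
          simpa using this
    · obtain ⟨l, heq, hprops, hnd, hcl⟩ := ih q0 v0 hv
      refine ⟨l, ?_, ?_, hnd, ?_⟩
      · simpa [pvBfsScan, hc] using heq
      · intro x hx
        obtain ⟨h1, h2, dd, hdd, he⟩ := hprops x hx
        exact ⟨h1, h2, dd, by simp [hdd], he⟩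
      · intro d' hd' hm
        rcases List.mem_cons.mp hd' with hd' | hd'
        · subst hd'
          have : (c.1 + d'.1, c.2 + d'.2) ∈ v0 := by
            by_contra h; exact hc ⟨hm, h⟩
          exact List.mem_append_left _ this
        · exact hcl d' hd' hm

-- A's while-loop: given the BFS invariants, the fuel suffices and the final
-- visited list is exactly the reachable set (and stays duplicate-free)
lemma pv_bfs_main (matter : List (Int × Int)) (s : Int × Int) :
    ∀ (fuel : Nat) (queue visited : List (Int × Int)),
    (∀ x ∈ queue, x ∈ visited) →
    (∀ x ∈ visited, pvReach matter s x) →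
    (∀ x ∈ visited, x ∈ matter) →
    visited.Nodup →
    s ∈ visited →
    (∀ p ∈ visited, p ∉ queue → ∀ q ∈ matter, pvAdj p q → q ∈ visited) →
    queue.length + matter.length ≤ fuel + visited.length →
    (∀ x ∈ pvBfs matter fuel queue visited, pvReach matter s x) ∧
    (∀ x, pvReach matter s x → x ∈ pvBfs matter fuel queue visited) ∧
    (pvBfs matter fuel queue visited).Nodup := by
  intro fuel
  induction fuel with
  | zero =>
    intro queue visited hQV hVR hVM hnd hsv hClosed hFuel
    have hlen : visited.length ≤ matter.length :=
      (List.subperm_of_subset hnd hVM).length_le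
    have hq : queue = [] := by
      cases queue with
      | nil => rfl
      | cons a t => simp at hFuel; omega
    subst hq
    refine ⟨hVR, ?_, hnd⟩
    exact pv_closed_complete matter s visited hsv
      (fun p hp => hClosed p hp (by simp))
  | succ fuel ih =>
    intro queue visited hQV hVR hVM hnd hsv hClosed hFuel
    cases queue with
    | nil =>
      refine ⟨hVR, ?_, hnd⟩
      exact pv_closed_complete matter s visited hsv
        (fun p hp => hClosed p hp (by simp))
    | cons c rest =>
      obtain ⟨l, heq, hprops, hnd', hcl⟩ :=
        pv_scan_fold matter c pvDirs rest visited hnd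
      have hcv : c ∈ visited := hQV c (by simp)
      have hres : pvBfs matter (fuel + 1) (c :: rest) visited
          = pvBfs matter fuel (rest ++ l) (visited ++ l) := by
        simp [pvBfs, heq]
      rw [hres]
      apply ih (rest ++ l) (visited ++ l)
      · intro x hx
        rcases List.mem_append.mp hx with hx | hx
        · exact List.mem_append_left _ (hQV x (by simp [hx]))
        · exact List.mem_append_right _ hx
      · intro x hx
        rcases List.mem_append.mp hx with hx | hx
        · exact hVR x hx
        · obtain ⟨h1, _, d, hd, he⟩ := hprops x hx
          exact pvReach.step c x (hVR c hcv) h1 (by subst he; exact List.mem_map_of_mem hd)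
      · intro x hx
        rcases List.mem_append.mp hx with hx | hx
        · exact hVM x hx
        · exact (hprops x hx).1
      · exact hnd'
      · exact List.mem_append_left _ hsv
      · intro p hp hpq q hq ha
        rcases List.mem_append.mp hp with hp | hp
        · by_cases hpc : p = c
          · subst hpc
            obtain ⟨d, hd, he⟩ := List.mem_map.mp ha
            exact he ▸ hcl d hd (he ▸ hq)
          · have : q ∈ visited :=
              hClosed p hp (by simp [hpc]; exact fun h => hpq (List.mem_append_left _ h)) q hq ha
            exact List.mem_append_left _ this
        · exact absurd (List.mem_append_right rest hp) hpq
      · simp at hFuel ⊢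
        omega

-- B's loop, in iterate form
def pvIt (matter r0 : List (Int × Int)) : Nat → List (Int × Int)
  | 0 => r0
  | k + 1 => pvGrow matter (pvIt matter r0 k)

lemma pv_foldl_range_grow (matter r0 : List (Int × Int)) (n : Nat) :
    (List.range n).foldl (fun r _ => pvGrow matter r) r0 = pvIt matter r0 n := by
  induction n with
  | zero => rfl
  | succ n ih => rw [List.range_succ, List.foldl_append, ih]; rfl

lemma pv_mem_grow (matter R : List (Int × Int)) (x : Int × Int) :
    x ∈ pvGrow matter R ↔ (x ∈ matter ∧ ∃ p ∈ R, x ∈ pvNbrs9 p) ∨ x ∈ R := by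
  simp [pvGrow, PySem.Set.mem_union, PySem.Set.mem_inter, PySem.Set.mem_ofList,
    List.mem_flatMap]

lemma pv_sub_grow (matter R : List (Int × Int)) : R ⊆ pvGrow matter R := by
  intro x hx; exact (pv_mem_grow matter R x).mpr (Or.inr hx)

lemma pv_nodup_grow (matter R : List (Int × Int)) (hm : matter.Nodup) :
    (pvGrow matter R).Nodup :=
  PySem.Set.nodup_union _ _ (PySem.Set.nodup_inter _ _ hm)

lemma pv_grow_congr (matter R R' : List (Int × Int))
    (h : ∀ x, x ∈ R ↔ x ∈ R') :
    ∀ x, x ∈ pvGrow matter R ↔ x ∈ pvGrow matter R' := by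
  intro x
  rw [pv_mem_grow, pv_mem_grow, h x]
  constructor <;>
    (rintro (⟨h1, p, hp, h2⟩ | h1)
     · exact Or.inl ⟨h1, p, by first | exact ⟨(h p).mp hp, h2⟩ | exact ⟨(h p).mpr hp, h2⟩⟩
     · exact Or.inr h1)

lemma pv_it_sound (matter : List (Int × Int)) (s : Int × Int) :
    ∀ k, (∀ x ∈ pvIt matter [s] k, pvReach matter s x) ∧ (s ∈ pvIt matter [s] k) ∧
      (s ∈ matter → ∀ x ∈ pvIt matter [s] k, x ∈ matter) ∧
      (matter.Nodup → (pvIt matter [s] k).Nodup) := by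
  intro k
  induction k with
  | zero =>
    exact ⟨by rintro x hx; simp [pvIt] at hx; exact hx ▸ pvReach.refl,
      by simp [pvIt], by rintro hs x hx; simp [pvIt] at hx; exact hx ▸ hs, by simp [pvIt]⟩
  | succ k ih =>
    obtain ⟨hR, hs, hM, hN⟩ := ih
    refine ⟨?_, pv_sub_grow _ _ hs, ?_, fun hm => pv_nodup_grow _ _ hm⟩
    · intro x hx
      rcases (pv_mem_grow _ _ _).mp hx with ⟨h1, p, hp, h2⟩ | h1
      · rcases (pv_mem_nbrs9 p x).mp h2 with he | ha
        · exact he ▸ hR p hp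
        · exact pvReach.step p x (hR p hp) h1 ha
      · exact hR x h1
    · intro hsm x hx
      rcases (pv_mem_grow _ _ _).mp hx with ⟨h1, _⟩ | h1
      · exact h1
      · exact hM hsm x h1

lemma pv_stable_succ (matter r0 : List (Int × Int)) (j : Nat)
    (h : ∀ x, x ∈ pvIt matter r0 (j + 1) ↔ x ∈ pvIt matter r0 j) :
    ∀ m, j ≤ m → ∀ x, x ∈ pvIt matter r0 m ↔ x ∈ pvIt matter r0 j := by
  intro m hm
  induction m, hm using Nat.le_induction with
  | base => intro x; rfl
  | succ m hm ih =>
    intro x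
    have := pv_grow_congr matter _ _ ih x
    exact (this.trans (h x))

lemma pv_progress (matter : List (Int × Int)) (s : Int × Int)
    (hm : matter.Nodup) :
    ∀ k, (∃ j ≤ k, ∀ x, x ∈ pvIt matter [s] (j + 1) ↔ x ∈ pvIt matter [s] j) ∨
      k + 1 ≤ (pvIt matter [s] k).length := by
  intro k
  induction k with
  | zero => right; simp [pvIt]
  | succ k ih =>
    rcases ih with ⟨j, hj, hst⟩ | hlen
    · exact Or.inl ⟨j, Nat.le_succ_of_le hj, hst⟩
    · by_cases hst : ∀ x, x ∈ pvIt matter [s] (k + 1) ↔ x ∈ pvIt matter [s] k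
      · exact Or.inl ⟨k, Nat.le_succ k, hst⟩
      · right
        push Not at hst
        obtain ⟨x, hx⟩ := hst
        have hsub : pvIt matter [s] k ⊆ pvIt matter [s] (k + 1) := pv_sub_grow _ _
        have hxin : x ∈ pvIt matter [s] (k + 1) ∧ x ∉ pvIt matter [s] k := by
          rcases hx with ⟨h1, h2⟩ | ⟨h1, h2⟩
          · exact ⟨h1, h2⟩
          · exact absurd (hsub h2) h1
        have hnd : (pvIt matter [s] k ++ [x]).Nodup := by
          simp [List.nodup_append, (pv_it_sound matter s k).2.2.2 hm]
          intro a b hab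
          exact fun h => hxin.2 (by rw [h] at hab; exact hab)
        have hsub2 : (pvIt matter [s] k ++ [x]) ⊆ pvIt matter [s] (k + 1) := by
          intro y hy
          rcases List.mem_append.mp hy with hy | hy
          · exact hsub hy
          · simp at hy; exact hy ▸ hxin.1
        have := (List.subperm_of_subset hnd hsub2).length_le
        simp at this
        omega

lemma pv_it_complete (matter : List (Int × Int)) (s : Int × Int)
    (hm : matter.Nodup) (hs : s ∈ matter) :
    ∀ x, pvReach matter s x → x ∈ pvIt matter [s] matter.length := by
  rcases pv_progress matter s hm matter.length with ⟨j, hj, hst⟩ | hlen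
  · have hsame := pv_stable_succ matter [s] j hst matter.length hj
    have hclosed : ∀ p ∈ pvIt matter [s] j, ∀ q ∈ matter, pvAdj p q → q ∈ pvIt matter [s] j := by
      intro p hp q hq ha
      have : q ∈ pvIt matter [s] (j + 1) :=
        (pv_mem_grow _ _ _).mpr (Or.inl ⟨hq, p, hp, (pv_mem_nbrs9 p q).mpr (Or.inr ha)⟩)
      exact (hst q).mp this
    intro x hx
    exact (hsame x).mpr
      (pv_closed_complete matter s _ ((pv_it_sound matter s j).2.1) hclosed x hx)
  · have hbound : (pvIt matter [s] matter.length).length ≤ matter.length :=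
      (List.subperm_of_subset ((pv_it_sound matter s _).2.2.2 hm)
        ((pv_it_sound matter s _).2.2.1 hs)).length_le
    omega

-- ===== VERDICT (by name: the statement is the Claim_ definition above) =====
theorem is_connected_after_move_spec : Claim_equal_is_connected_after_move := by
  intro nps _ hpre
  unfold Spec_is_connected_after_move
  match nps with
  | [] => exact absurd rfl hpre
  | p :: rest =>
    simp only [is_connected_after_move, is_connected_after_move_alt]
    rw [pv_foldl_range_grow]
    have hmnd : (PySem.Set.ofList (p :: rest)).Nodup := PySem.Set.nodup_ofList _
    have hpm : p ∈ PySem.Set.ofList (p :: rest) := by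
      rw [PySem.Set.mem_ofList]; simp
    obtain ⟨hA1, hA2, hA3⟩ :=
      pv_bfs_main (PySem.Set.ofList (p :: rest)) p (p :: rest).length [p] [p]
        (by simp) (by rintro x hx; simp at hx; exact hx ▸ pvReach.refl)
        (by rintro x hx; simp at hx; exact hx ▸ hpm) (by simp) (by simp)
        (by rintro q hq hnq; simp at hq; exact absurd (by simp [hq]) hnq)
        (by have := PySem.Set.length_ofList_le (p :: rest); simp at this ⊢; omega)
    obtain ⟨hB1, _, _, hB4⟩ :=
      pv_it_sound (PySem.Set.ofList (p :: rest)) p ((PySem.Set.ofList (p :: rest)).length)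
    have hBc := pv_it_complete (PySem.Set.ofList (p :: rest)) p hmnd hpm
    have hperm :
        (pvBfs (PySem.Set.ofList (p :: rest)) (p :: rest).length [p] [p]).Perm
          (pvIt (PySem.Set.ofList (p :: rest)) [p] (PySem.Set.ofList (p :: rest)).length) :=
      (List.perm_ext_iff_of_nodup hA3 (hB4 hmnd)).mpr
        (fun x => ⟨fun h => hBc x (hA1 x h), fun h => hA2 x (hB1 x h)⟩)
    rw [hperm.length_eq]
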